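-- pv_equiv track=rewrite | github.com/Lobo2008/LeetCode | 79_Word_Search.py | _hasEnoughChar
-- ===== SOURCE A (Python) =====
-- def _hasEnoughChar(board, word):
--     from collections import Counter
--     c_w = Counter(word) #SEE  ->  Counter({'E': 2, 'S': 1})
--     c_board = Counter([c for row in board for c in row])#Counter({'E': 3, 'A': 2, 'C': 2, 'S': 2, 'B': 1, 'F': 1, 'D': 1})
--     for w,c in c_w.items():
--         if c_board[w]<c:
--             return False
--     return True
-- ===== SOURCE B (Python) =====
-- def _hasEnoughChar(board, word):
--     need = sorted(word)
--     have = sorted(c for row in board for c in row)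
--     i = 0
--     for ch in need:
--         while i < len(have) and have[i] < ch:
--             i += 1
--         if i == len(have) or have[i] != ch:
--             return False
--         i += 1
--     return True
-- ===== Notes on version B (the rewrite author's own statement) =====
-- stated objective: alternative
-- what changed: Replaces the two Counter frequency tables and the per-key comparison with sorting plus a two-pointer merge scan: both the word and the flattened board are sorted and a single synchronized pass consumes one board cell per word character, so no counts are ever computed.
import Mathlib
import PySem

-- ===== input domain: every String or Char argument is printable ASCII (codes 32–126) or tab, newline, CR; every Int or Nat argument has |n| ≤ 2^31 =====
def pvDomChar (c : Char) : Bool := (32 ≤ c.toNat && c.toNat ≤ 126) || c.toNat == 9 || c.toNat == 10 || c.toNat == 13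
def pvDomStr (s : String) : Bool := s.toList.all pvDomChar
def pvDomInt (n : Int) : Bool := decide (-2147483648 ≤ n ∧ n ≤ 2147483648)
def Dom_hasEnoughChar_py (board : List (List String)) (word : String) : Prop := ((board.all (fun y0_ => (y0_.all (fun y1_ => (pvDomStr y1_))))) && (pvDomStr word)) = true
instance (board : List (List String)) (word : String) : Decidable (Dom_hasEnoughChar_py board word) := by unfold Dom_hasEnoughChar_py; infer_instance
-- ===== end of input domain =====

-- B drops both Counter tables: it sorts the word and the flattened board and runs a
-- two-pointer merge scan consuming one board cell per word character (objective: alternative).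

-- ===== PORT A =====
-- 'for w,c in c_w.items(): if c_board[w]<c: return False' / 'return True'
def pvLoopA (c_board : PySem.Dict String Int) : List (String × Int) → Bool
  | [] => true
  | (w, c) :: rest => if c_board.getD w 0 < c then false else pvLoopA c_board rest

def hasEnoughChar_py (board : List (List String)) (word : String) : Bool :=
  let c_w : PySem.Dict String Int := PySem.Dict.counter (word.toList.map (fun ch => String.ofList [ch]))
  let c_board : PySem.Dict String Int := PySem.Dict.counter (board.flatMap (fun row => row))
  pvLoopA c_board c_w.items

-- ===== PORT B =====
-- the for-over-need / while-over-have index loop as the obvious two-list recursion: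
-- 'while i < len(have) and have[i] < ch: i += 1' = drop the head while it is < ch;
-- 'if i == len(have) or have[i] != ch: return False' = fail on empty rest or mismatch; else consume both.
def pvScan : List String → List String → Bool
  | [], _ => true
  | _ :: _, [] => false
  | ch :: nd, h :: hs =>
      if h < ch then pvScan (ch :: nd) hs
      else if h == ch then pvScan nd hs
      else false
termination_by nd hv => nd.length + hv.length
decreasing_by
  all_goals simp
  all_goals omega

def hasEnoughChar_py_alt (board : List (List String)) (word : String) : Bool :=
  let need := PySem.List.sorted (word.toList.map (fun ch => String.ofList [ch])) (fun x => x) false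
  let have_ := PySem.List.sorted (board.flatMap (fun row => row)) (fun x => x) false
  pvScan need have_

-- ===== PRECONDITION & SPEC =====
def Spec_hasEnoughChar_py (board : List (List String)) (word : String) (out : Bool) : Prop := out = hasEnoughChar_py_alt board word
instance (board : List (List String)) (word : String) (out : Bool) : Decidable (Spec_hasEnoughChar_py board word out) := by unfold Spec_hasEnoughChar_py; infer_instance

-- ===== CLAIM (what is proved, stated in full; the proofs are below) =====
def Claim_equal_hasEnoughChar_py : Prop := ∀ (board : List (List String)) (word : String), Dom_hasEnoughChar_py board word → Spec_hasEnoughChar_py board word (hasEnoughChar_py board word)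

-- ===== LEMMAS AND PROOFS =====

-- Both sides are characterised by the same multiset-inclusion property:
-- every string occurs among the word's singletons at most as often as among the board cells.

-- B: on sorted inputs the merge scan decides exactly multiset inclusion
theorem pvScan_iff (nd hv : List String) :
    nd.Pairwise (· ≤ ·) → hv.Pairwise (· ≤ ·) →
      (pvScan nd hv = true ↔ ∀ s : String, nd.count s ≤ hv.count s) := by
  induction nd, hv using pvScan.induct with
  | case1 hv => intro _ _; simp [pvScan]
  | case2 ch nd =>
      intro _ _
      rw [pvScan]
      simp only [Bool.false_eq_true, false_iff, not_forall, not_le]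
      exact ⟨ch, by simp⟩
  | case3 ch nd h hs hlt ih =>
      intro hnd hhv
      rw [pvScan, if_pos hlt]
      rw [ih hnd (List.Pairwise.sublist (List.sublist_cons_self h hs) hhv)]
      constructor
      · intro hall s
        exact le_trans (hall s) ((List.sublist_cons_self h hs).count_le s)
      · intro hall s
        have hc := hall s
        by_cases hmem : s ∈ ch :: nd
        · have hge : ch ≤ s := by
            rcases List.mem_cons.mp hmem with e | hm
            · simp [e]
            · exact (List.pairwise_cons.mp hnd).1 s hm
          have hne : (h == s) = false := by
            have : h ≠ s := fun e => absurd hlt (not_lt_of_ge (e ▸ hge))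
            simpa using this
          simpa [List.count_cons, hne] using hc
        · simp [List.count_eq_zero.mpr hmem]
  | case4 ch nd h hs hlt heq ih =>
      intro hnd hhv
      have he : h = ch := by simpa using heq
      rw [pvScan, if_neg hlt, if_pos heq]
      rw [ih (List.Pairwise.sublist (List.sublist_cons_self ch nd) hnd)
            (List.Pairwise.sublist (List.sublist_cons_self h hs) hhv)]
      constructor
      · intro hall s
        have := hall s
        simp only [List.count_cons, he]
        omega
      · intro hall s
        have := hall s
        simp only [List.count_cons, he] at this
        omega
  | case5 ch nd h hs hlt heq =>
      intro hnd hhv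
      rw [pvScan, if_neg hlt, if_neg heq]
      simp only [Bool.false_eq_true, false_iff, not_forall, not_le]
      refine ⟨ch, ?_⟩
      have hne : h ≠ ch := by simpa using heq
      have hchlt : ch < h := lt_of_le_of_ne (le_of_not_gt hlt) (Ne.symm hne)
      have h0 : (h :: hs).count ch = 0 := by
        apply List.count_eq_zero.mpr
        intro hmem
        rcases List.mem_cons.mp hmem with e | hm
        · exact absurd (e ▸ hchlt) (lt_irrefl _)
        · exact absurd (lt_of_lt_of_le hchlt ((List.pairwise_cons.mp hhv).1 ch hm))
            (lt_irrefl _)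
      simp [h0]

-- A: the loop over items is List.all
theorem pvLoopA_eq_all (cb : PySem.Dict String Int) (l : List (String × Int)) :
    pvLoopA cb l = l.all (fun p => !decide (cb.getD p.1 0 < p.2)) := by
  induction l with
  | nil => rfl
  | cons p rest ih =>
      obtain ⟨w, c⟩ := p
      by_cases h : cb.getD w 0 < c <;> simp [pvLoopA, h, ih]

-- A: the Counter comparison realises the same multiset-inclusion property
theorem pvA_iff (board : List (List String)) (word : String) :
    hasEnoughChar_py board word = true ↔
      ∀ s : String, (word.toList.map (fun c => String.ofList [c])).count s
          ≤ (board.flatMap (fun row => row)).count s := by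
  unfold hasEnoughChar_py
  rw [pvLoopA_eq_all, PySem.Dict.items_counter]
  simp only [List.all_map, List.all_eq_true, Function.comp_def, Bool.not_eq_eq_eq_not,
    Bool.not_true, decide_eq_false_iff_not, not_lt, PySem.Dict.getD_counter]
  constructor
  · intro hall s
    by_cases hs : s ∈ word.toList.map (fun c => String.ofList [c])
    · have := hall s (((PySem.Set.mem_ofList _ _)).mpr hs)
      exact_mod_cast this
    · simp [List.count_eq_zero.mpr hs]
  · intro hall s hs
    exact_mod_cast hall s

-- B: sorting preserves counts, so B also decides multiset inclusion
theorem pvB_iff (board : List (List String)) (word : String) :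
    hasEnoughChar_py_alt board word = true ↔
      ∀ s : String, (word.toList.map (fun c => String.ofList [c])).count s
          ≤ (board.flatMap (fun row => row)).count s := by
  unfold hasEnoughChar_py_alt
  rw [pvScan_iff _ _ (PySem.List.sorted_pairwise _ _) (PySem.List.sorted_pairwise _ _)]
  constructor <;> intro hall s <;> have := hall s
  · rwa [(PySem.List.sorted_perm _ _ _).count_eq, (PySem.List.sorted_perm _ _ _).count_eq] at this
  · rwa [(PySem.List.sorted_perm _ _ _).count_eq, (PySem.List.sorted_perm _ _ _).count_eq]

theorem hasEnoughChar_eq (board : List (List String)) (word : String) :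
    hasEnoughChar_py board word = hasEnoughChar_py_alt board word := by
  rw [Bool.eq_iff_iff, pvA_iff, pvB_iff]

-- ===== VERDICT (by name: the statement is the Claim_ definition above) =====
theorem hasEnoughChar_py_spec : Claim_equal_hasEnoughChar_py := by
  intro board word _
  unfold Spec_hasEnoughChar_py
  exact hasEnoughChar_eq board word
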